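-- pv_equiv track=rewrite | github.com/agastyaseth/rtl_bug_detection | scripts/eval_from_preds.py | window_overlap
-- ===== SOURCE A (Python) =====
-- from typing import Dict, List, Tuple
--
-- def window_overlap(pred: List[int], gold: List[int], window: int) -> bool:
--     if not pred or not gold:
--         return False
--     expanded = set()
--     for g in gold:
--         for v in range(g - window, g + window + 1):
--             expanded.add(v)
--     return any(p in expanded for p in pred)
-- ===== SOURCE B (Python) =====
-- from typing import List
--
-- def window_overlap(pred: List[int], gold: List[int], window: int) -> bool:
--     return any(abs(p - g) <= window for p in pred for g in gold)
-- ===== Notes on version B (the rewrite author's own statement) =====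
-- stated objective: faster
-- what changed: Replaces the materialised set of every integer within the window of any gold point (O(|gold|*window) time and memory) with a direct short-circuiting pairwise |p-g| <= window scan whose cost is independent of the window size.
import Mathlib
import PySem

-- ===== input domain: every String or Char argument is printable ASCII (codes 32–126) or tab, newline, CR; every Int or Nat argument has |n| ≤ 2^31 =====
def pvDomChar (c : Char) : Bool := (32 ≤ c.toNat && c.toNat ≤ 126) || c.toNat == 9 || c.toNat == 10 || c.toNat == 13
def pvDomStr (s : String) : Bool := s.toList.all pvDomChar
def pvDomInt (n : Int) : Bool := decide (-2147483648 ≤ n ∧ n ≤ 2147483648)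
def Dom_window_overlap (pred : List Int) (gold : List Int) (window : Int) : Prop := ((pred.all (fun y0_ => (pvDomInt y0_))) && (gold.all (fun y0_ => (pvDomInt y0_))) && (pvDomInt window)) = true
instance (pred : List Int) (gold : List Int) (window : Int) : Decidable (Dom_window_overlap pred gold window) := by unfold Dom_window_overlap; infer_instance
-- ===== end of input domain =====

-- ===== PORT A =====
-- Port of A: early empty checks, expand gold into a set of window-covered
-- integers, then membership test per pred.  The Python set is modelled by
-- Std.TreeSet Int: A only adds elements and tests membership (it never iterates
-- the set), so this is observationally exact; the list-backed PySem.Set makes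
-- this expansion quadratic and infeasible to evaluate for large windows.
def window_overlap (pred : List Int) (gold : List Int) (window : Int) : Bool :=
  if pred = [] ∨ gold = [] then false
  else
    let expanded : Std.TreeSet Int :=
      gold.foldl
        (fun s g =>
          (PySem.List.pyRange (g - window) (g + window + 1) 1).foldl
            (fun s v => s.insert v) s)
        (∅ : Std.TreeSet Int)
    pred.any (fun p => expanded.contains p)

-- ===== PORT B =====
-- Port of B: direct pairwise short-circuit scan, no set.
def window_overlap_alt (pred : List Int) (gold : List Int) (window : Int) : Bool :=
  pred.any (fun p => gold.any (fun g => decide (|p - g| ≤ window)))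

-- ===== PRECONDITION & SPEC =====
def Spec_window_overlap (pred : List Int) (gold : List Int) (window : Int) (out : Bool) : Prop := out = window_overlap_alt pred gold window
instance (pred : List Int) (gold : List Int) (window : Int) (out : Bool) : Decidable (Spec_window_overlap pred gold window out) := by unfold Spec_window_overlap; infer_instance

-- ===== CLAIM (what is proved, stated in full; the proofs are below) =====
def Claim_equal_window_overlap : Prop := ∀ (pred : List Int) (gold : List Int) (window : Int), Dom_window_overlap pred gold window → Spec_window_overlap pred gold window (window_overlap pred gold window)

-- ===== LEMMAS AND PROOFS =====

-- ===== VERDICT (by name: the statement is the Claim_ definition above) =====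
-- membership after folding a list of inserts into a TreeSet
lemma mem_foldl_insert (l : List Int) (t : Std.TreeSet Int) (x : Int) :
    x ∈ l.foldl (fun s v => s.insert v) t ↔ x ∈ t ∨ x ∈ l := by
  induction l generalizing t with
  | nil => simp
  | cons v vs ih =>
    simp only [List.foldl_cons, ih, Std.TreeSet.mem_insert, List.mem_cons]
    have hc : compare v x = Ordering.eq ↔ x = v :=
      ⟨fun h => (Std.LawfulEqCmp.compare_eq_iff_eq.mp h).symm,
       fun h => Std.LawfulEqCmp.compare_eq_iff_eq.mpr h.symm⟩
    rw [hc]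
    tauto

-- membership in A's accumulated set
lemma mem_expanded (gold : List Int) (window : Int) (s : Std.TreeSet Int) (x : Int) :
    x ∈ gold.foldl
        (fun s g =>
          (PySem.List.pyRange (g - window) (g + window + 1) 1).foldl
            (fun s v => s.insert v) s)
        s ↔ x ∈ s ∨ ∃ g ∈ gold, g - window ≤ x ∧ x < g + window + 1 := by
  induction gold generalizing s with
  | nil => simp
  | cons g gs ih =>
    simp only [List.foldl_cons, ih]
    rw [mem_foldl_insert]
    simp only [PySem.List.mem_pyRange_one]
    constructor
    · rintro (⟨hy | hr⟩ | ⟨g', hg', hb⟩)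
      · exact Or.inl hy
      · exact Or.inr ⟨g, by simp, hr⟩
      · exact Or.inr ⟨g', by simp [hg'], hb⟩
    · rintro (hy | ⟨g', hg', hb⟩)
      · exact Or.inl (Or.inl hy)
      · rcases List.mem_cons.mp hg' with h1 | h2
        · exact Or.inl (Or.inr (h1 ▸ hb))
        · exact Or.inr ⟨g', h2, hb⟩

theorem window_overlap_spec : Claim_equal_window_overlap := by
  intro pred gold window _
  unfold Spec_window_overlap window_overlap window_overlap_alt
  split_ifs with h
  · rcases h with h | h <;> simp [h]
  · rw [Bool.eq_iff_iff]
    simp only [List.any_eq_true, Std.TreeSet.contains_iff_mem, mem_expanded,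
      Std.TreeSet.not_mem_emptyc, false_or, decide_eq_true_eq]
    constructor
    · rintro ⟨p, hp, g, hg, hb⟩
      exact ⟨p, hp, g, hg, abs_le.mpr (by omega)⟩
    · rintro ⟨p, hp, g, hg, hb⟩
      exact ⟨p, hp, g, hg, by have := abs_le.mp hb; omega⟩
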